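-- pv_equiv track=rewrite | github.com/pypi-data/pypi-mirror-359 | packages/garmy/garmy-2.0.0.tar.gz/garmy-2.0.0/src/garmy/mcp/server.py | _contains_multiple_statements
-- ===== SOURCE A (Python) =====
-- def _contains_multiple_statements(sql: str) -> bool:
--     """Check if SQL contains multiple statements."""
--     in_single_quote = False
--     in_double_quote = False
--
--     for char in sql:
--         if char == "'" and not in_double_quote:
--             in_single_quote = not in_single_quote
--         elif char == '"' and not in_single_quote:
--             in_double_quote = not in_double_quote
--         elif char == ';' and not in_single_quote and not in_double_quote:
--             return True
--
--     return False
-- ===== SOURCE B (Python) =====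
-- def _contains_multiple_statements(sql: str) -> bool:
--     """Check if SQL contains multiple statements (semicolon outside quotes)."""
--     rest = sql
--     while rest:
--         c, rest = rest[0], rest[1:]
--         if c == "'":
--             rest = rest.partition("'")[2]
--         elif c == '"':
--             rest = rest.partition('"')[2]
--         elif c == ';':
--             return True
--     return False
-- ===== Notes on version B (the rewrite author's own statement) =====
-- stated objective: alternative
-- what changed: B replaces A's per-character scan with two toggled quote-state booleans by a scanner that, on seeing a quote, jumps straight past the whole quoted run with str.partition, so no quote-state flags are carried at all (it trades CPython speed for this: repeated slicing makes it quadratic on huge inputs).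
import Mathlib
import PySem

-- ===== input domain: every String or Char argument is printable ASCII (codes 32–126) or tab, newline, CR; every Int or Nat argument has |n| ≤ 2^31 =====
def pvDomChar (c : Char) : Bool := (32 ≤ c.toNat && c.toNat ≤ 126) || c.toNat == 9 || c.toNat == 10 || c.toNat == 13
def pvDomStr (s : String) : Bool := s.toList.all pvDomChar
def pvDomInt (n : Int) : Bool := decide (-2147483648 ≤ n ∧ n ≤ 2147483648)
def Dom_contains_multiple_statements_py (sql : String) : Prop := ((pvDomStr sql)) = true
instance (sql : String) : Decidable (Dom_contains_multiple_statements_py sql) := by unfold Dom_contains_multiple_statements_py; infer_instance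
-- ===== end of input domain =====

-- B scans by jumping over whole quoted runs with str.partition instead of toggling
-- per-character quote flags; same result, simpler state (objective: alternative).

-- ===== PORT A =====
-- char-by-char loop carrying the two quote flags; early return on unquoted ';'
def pvAGo : List Char → Bool → Bool → Bool
  | [], _, _ => false
  | c :: rest, sq, dq =>
    if c = '\'' ∧ ¬(dq = true) then pvAGo rest (!sq) dq
    else if c = '"' ∧ ¬(sq = true) then pvAGo rest sq (!dq)
    else if c = ';' ∧ ¬(sq = true) ∧ ¬(dq = true) then true
    else pvAGo rest sq dq

def contains_multiple_statements_py (sql : String) : Bool :=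
  pvAGo sql.toList false false

-- ===== PORT B =====
-- rest.partition(q)[2]: everything after the first occurrence of q ([] if none)
def pvPartAfter (q : Char) (l : List Char) : List Char :=
  (l.dropWhile (fun c => ¬ c = q)).drop 1

theorem pvPartAfter_len (q : Char) (l : List Char) : (pvPartAfter q l).length ≤ l.length := by
  have h := List.length_dropWhile_le (fun c => ¬ c = q) l
  simp only [pvPartAfter, List.length_drop]
  omega

def pvBGo : List Char → Bool
  | [] => false
  | c :: rest =>
    if c = '\'' then pvBGo (pvPartAfter '\'' rest)
    else if c = '"' then pvBGo (pvPartAfter '"' rest)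
    else if c = ';' then true
    else pvBGo rest
termination_by l => l.length
decreasing_by
  · exact Nat.lt_succ_of_le (pvPartAfter_len _ _)
  · exact Nat.lt_succ_of_le (pvPartAfter_len _ _)
  · exact Nat.lt_succ_self _

def contains_multiple_statements_py_alt (sql : String) : Bool :=
  pvBGo sql.toList

-- ===== PRECONDITION & SPEC =====
def Spec_contains_multiple_statements_py (sql : String) (out : Bool) : Prop := out = contains_multiple_statements_py_alt sql
instance (sql : String) (out : Bool) : Decidable (Spec_contains_multiple_statements_py sql out) := by unfold Spec_contains_multiple_statements_py; infer_instance

-- ===== CLAIM (what is proved, stated in full; the proofs are below) =====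
def Claim_equal_contains_multiple_statements_py : Prop := ∀ (sql : String), Dom_contains_multiple_statements_py sql → Spec_contains_multiple_statements_py sql (contains_multiple_statements_py sql)

-- ===== LEMMAS AND PROOFS =====

-- inside a single-quoted run, A ignores everything until the closing ' — i.e. it
-- resumes in the neutral state exactly where B's partition jump lands.
theorem pvA_single (l : List Char) : pvAGo l true false = pvAGo (pvPartAfter '\'' l) false false := by
  induction l with
  | nil => simp [pvPartAfter, pvAGo]
  | cons c rest ih =>
    by_cases h : c = '\''
    · subst h; simp [pvAGo, pvPartAfter, List.dropWhile]
    · simp [pvAGo, pvPartAfter, List.dropWhile, h, ih]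

theorem pvA_double (l : List Char) : pvAGo l false true = pvAGo (pvPartAfter '"' l) false false := by
  induction l with
  | nil => simp [pvPartAfter, pvAGo]
  | cons c rest ih =>
    by_cases h : c = '"'
    · subst h; simp [pvAGo, pvPartAfter, List.dropWhile]
    · simp [pvAGo, pvPartAfter, List.dropWhile, h, ih]

theorem pvA_eq_B (l : List Char) : pvAGo l false false = pvBGo l := by
  induction l using pvBGo.induct with
  | case1 => simp [pvAGo, pvBGo]
  | case2 rest ih => simp [pvAGo, pvBGo, pvA_single, ih]
  | case3 rest h1 ih => simp [pvAGo, pvBGo, pvA_double, ih]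
  | case4 rest h1 h2 => simp [pvAGo, pvBGo]
  | case5 c rest h1 h2 h3 ih => simp [pvAGo, pvBGo, h1, h2, h3, ih]

-- ===== VERDICT (by name: the statement is the Claim_ definition above) =====
theorem contains_multiple_statements_py_spec : Claim_equal_contains_multiple_statements_py := by
  intro sql _
  unfold Spec_contains_multiple_statements_py contains_multiple_statements_py contains_multiple_statements_py_alt
  exact pvA_eq_B _
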